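-- pv_equiv track=rewrite | github.com/dark-carbon-code/EngineeringDocs2LLM | engdocs2llm/extractors/dxf_extractor.py | classify_by_layer
-- ===== SOURCE A (Python) =====
-- def classify_by_layer(layer_name, block_name):
--     """Classify equipment type from layer/block naming conventions."""
--     ln = layer_name.upper()
--     bn = block_name.upper()
--
--     # Instrument layers
--     if any(p in ln for p in ["I-", "INST", "INSTR"]):
--         if any(v in bn for v in ["FCV", "TCV", "PCV", "LCV", "CTRL"]):
--             return "control_valve"
--         return "instrument"
--
--     # Piping
--     if any(p in ln for p in ["P-PIPE", "PIPING", "P-LINE"]):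
--         return "piping"
--
--     # Equipment
--     if any(p in ln for p in ["P-EQUIP", "EQUIP", "P-VESSEL", "P-MECH"]):
--         # Try to classify by block name
--         if any(v in bn for v in ["PUMP", "PMP"]):
--             return "pump"
--         if any(v in bn for v in ["TANK", "TK", "VESSEL", "DRUM"]):
--             return "vessel"
--         if any(v in bn for v in ["HX", "HEAT", "EXCH", "COOL"]):
--             return "heat_exchanger"
--         if any(v in bn for v in ["COMP", "BLOWER", "FAN"]):
--             return "compressor"
--         if any(v in bn for v in ["REACT", "COLUMN", "TOWER"]):
--             return "reactor_column"
--         return "equipment"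
--
--     # Valves
--     if any(p in ln for p in ["P-VALVE", "VALVE"]):
--         return "valve"
--
--     # Electrical
--     if any(p in ln for p in ["E-", "ELEC"]):
--         return "electrical"
--
--     return "unknown"
-- ===== SOURCE B (Python) =====
-- # Classify by the MINIMUM priority among ALL matching keywords (no early-return
-- # cascade): every keyword carries a priority; we scan them all and dispatch on
-- # the best (smallest) priority found.
--
-- LAYER_KW = [("I-", 0), ("INST", 0), ("INSTR", 0),
--             ("P-PIPE", 1), ("PIPING", 1), ("P-LINE", 1),
--             ("P-EQUIP", 2), ("EQUIP", 2), ("P-VESSEL", 2), ("P-MECH", 2),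
--             ("P-VALVE", 3), ("VALVE", 3),
--             ("E-", 4), ("ELEC", 4)]
-- GROUP_RESULTS = ["instrument", "piping", "equipment", "valve", "electrical", "unknown"]
--
-- CTRL_KW = [("FCV", 0), ("TCV", 0), ("PCV", 0), ("LCV", 0), ("CTRL", 0)]
--
-- EQUIP_KW = [("PUMP", 0), ("PMP", 0),
--             ("TANK", 1), ("TK", 1), ("VESSEL", 1), ("DRUM", 1),
--             ("HX", 2), ("HEAT", 2), ("EXCH", 2), ("COOL", 2),
--             ("COMP", 3), ("BLOWER", 3), ("FAN", 3),
--             ("REACT", 4), ("COLUMN", 4), ("TOWER", 4)]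
-- EQUIP_RESULTS = ["pump", "vessel", "heat_exchanger", "compressor", "reactor_column", "equipment"]
--
--
-- def _best(name, pairs, miss):
--     """Smallest priority among all keywords occurring in name, or miss if none."""
--     hits = [i for kw, i in pairs if kw in name]
--     return min(hits) if hits else miss
--
--
-- def classify_by_layer(layer_name, block_name):
--     """Classify equipment type from layer/block naming conventions."""
--     ln = layer_name.upper()
--     bn = block_name.upper()
--     g = _best(ln, LAYER_KW, 5)
--     if g == 0:
--         return "control_valve" if _best(bn, CTRL_KW, 1) == 0 else "instrument"
--     if g == 2:
--         return EQUIP_RESULTS[_best(bn, EQUIP_KW, 5)]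
--     return GROUP_RESULTS[g]
-- ===== Notes on version B (the rewrite author's own statement) =====
-- stated objective: alternative
-- what changed: Replaces the ordered early-return if-cascade with an exhaustive search: all keywords are flattened into (keyword, priority) pairs, the minimum priority among every matching keyword is computed, and the result is read off result tables indexed by that priority.
import Mathlib
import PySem

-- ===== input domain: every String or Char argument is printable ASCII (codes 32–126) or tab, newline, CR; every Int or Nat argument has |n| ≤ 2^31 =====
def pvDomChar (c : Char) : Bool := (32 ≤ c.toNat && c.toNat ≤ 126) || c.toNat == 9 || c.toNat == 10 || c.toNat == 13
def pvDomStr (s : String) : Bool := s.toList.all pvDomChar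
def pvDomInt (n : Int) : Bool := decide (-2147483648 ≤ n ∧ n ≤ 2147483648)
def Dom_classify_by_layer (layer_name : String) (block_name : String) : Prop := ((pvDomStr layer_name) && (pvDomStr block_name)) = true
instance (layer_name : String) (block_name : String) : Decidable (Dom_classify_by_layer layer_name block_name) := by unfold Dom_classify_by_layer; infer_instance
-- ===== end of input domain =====

-- B replaces A's first-match if-cascade by an exhaustive min-priority search over
-- flattened (keyword, priority) pairs plus result-table lookups (alternative; same cost).

-- ===== PORT A =====
def classify_by_layer (layer_name : String) (block_name : String) : String :=
  let ln := PySem.Str.upper layer_name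
  let bn := PySem.Str.upper block_name
  if ["I-", "INST", "INSTR"].any (fun p => PySem.Str.isIn p ln) then
    if ["FCV", "TCV", "PCV", "LCV", "CTRL"].any (fun v => PySem.Str.isIn v bn) then "control_valve"
    else "instrument"
  else if ["P-PIPE", "PIPING", "P-LINE"].any (fun p => PySem.Str.isIn p ln) then "piping"
  else if ["P-EQUIP", "EQUIP", "P-VESSEL", "P-MECH"].any (fun p => PySem.Str.isIn p ln) then
    if ["PUMP", "PMP"].any (fun v => PySem.Str.isIn v bn) then "pump"
    else if ["TANK", "TK", "VESSEL", "DRUM"].any (fun v => PySem.Str.isIn v bn) then "vessel"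
    else if ["HX", "HEAT", "EXCH", "COOL"].any (fun v => PySem.Str.isIn v bn) then "heat_exchanger"
    else if ["COMP", "BLOWER", "FAN"].any (fun v => PySem.Str.isIn v bn) then "compressor"
    else if ["REACT", "COLUMN", "TOWER"].any (fun v => PySem.Str.isIn v bn) then "reactor_column"
    else "equipment"
  else if ["P-VALVE", "VALVE"].any (fun p => PySem.Str.isIn p ln) then "valve"
  else if ["E-", "ELEC"].any (fun p => PySem.Str.isIn p ln) then "electrical"
  else "unknown"

-- ===== PORT B =====
-- flattened (keyword, priority) tables of Source B
def pvLayerKW : List (String × Nat) :=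
  [("I-", 0), ("INST", 0), ("INSTR", 0),
   ("P-PIPE", 1), ("PIPING", 1), ("P-LINE", 1),
   ("P-EQUIP", 2), ("EQUIP", 2), ("P-VESSEL", 2), ("P-MECH", 2),
   ("P-VALVE", 3), ("VALVE", 3),
   ("E-", 4), ("ELEC", 4)]
def pvGroupResults : List String :=
  ["instrument", "piping", "equipment", "valve", "electrical", "unknown"]
def pvCtrlKW : List (String × Nat) :=
  [("FCV", 0), ("TCV", 0), ("PCV", 0), ("LCV", 0), ("CTRL", 0)]
def pvEquipKW : List (String × Nat) :=
  [("PUMP", 0), ("PMP", 0),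
   ("TANK", 1), ("TK", 1), ("VESSEL", 1), ("DRUM", 1),
   ("HX", 2), ("HEAT", 2), ("EXCH", 2), ("COOL", 2),
   ("COMP", 3), ("BLOWER", 3), ("FAN", 3),
   ("REACT", 4), ("COLUMN", 4), ("TOWER", 4)]
def pvEquipResults : List String :=
  ["pump", "vessel", "heat_exchanger", "compressor", "reactor_column", "equipment"]

-- _best of Source B: smallest priority among all matching keywords, or miss if none
def pvBest (name : String) (pairs : List (String × Nat)) (miss : Nat) : Nat :=
  match pairs.filterMap (fun p => if PySem.Str.isIn p.1 name then some p.2 else none) with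
  | [] => miss
  | x :: xs => xs.foldl Nat.min x

def classify_by_layer_alt (layer_name : String) (block_name : String) : String :=
  let ln := PySem.Str.upper layer_name
  let bn := PySem.Str.upper block_name
  let g := pvBest ln pvLayerKW 5
  if g = 0 then
    if pvBest bn pvCtrlKW 1 = 0 then "control_valve" else "instrument"
  else if g = 2 then
    pvEquipResults.getD (pvBest bn pvEquipKW 5) "equipment"  -- index always in range (≤ 5)
  else
    pvGroupResults.getD g "unknown"  -- index always in range (1 ≤ g ≤ 5)

-- ===== PRECONDITION & SPEC =====
def Spec_classify_by_layer (layer_name : String) (block_name : String) (out : String) : Prop := out = classify_by_layer_alt layer_name block_name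
instance (layer_name : String) (block_name : String) (out : String) : Decidable (Spec_classify_by_layer layer_name block_name out) := by unfold Spec_classify_by_layer; infer_instance

-- ===== CLAIM =====
def Claim_equal_classify_by_layer : Prop := ∀ (layer_name : String) (block_name : String), Dom_classify_by_layer layer_name block_name → Spec_classify_by_layer layer_name block_name (classify_by_layer layer_name block_name)

-- ===== LEMMAS AND PROOFS =====

-- the filtering function of _best, named for the lemmas
def pvF (name : String) : String × Nat → Option Nat :=
  fun p => if PySem.Str.isIn p.1 name then some p.2 else none

theorem pvBest_eq_min? (name : String) (pairs : List (String × Nat)) (miss : Nat) :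
    pvBest name pairs miss = ((pairs.filterMap (pvF name)).min?).getD miss := by
  unfold pvBest pvF
  cases h : pairs.filterMap (fun p => if PySem.Str.isIn p.1 name then some p.2 else none) <;>
    simp [List.min?]

theorem pvMin?_append (xs ys : List Nat) :
    (xs ++ ys).min? = xs.min?.elim ys.min? (fun a => some (ys.min?.elim a (Nat.min a))) := by
  induction xs with
  | nil => cases h : ys.min? <;> simp [h]
  | cons a t ih =>
    simp only [List.cons_append, List.min?_cons, ih]
    cases ht : t.min? <;> cases hy : ys.min? <;> simp [Nat.min_assoc]

-- a constant-priority keyword group contributes its priority iff any keyword matches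
theorem pvGroupMin (name : String) (i : Nat) (ks : List String) :
    ((ks.map (fun k => (k, i))).filterMap (pvF name)).min? =
      (if ks.any (fun k => PySem.Str.isIn k name) then some i else none) := by
  induction ks with
  | nil => simp
  | cons k t ih =>
    simp only [List.map_cons, List.filterMap_cons, List.any_cons]
    by_cases h : PySem.Str.isIn k name = true
    · rw [show pvF name (k, i) = some i from by unfold pvF; exact if_pos h]
      simp only [h, Bool.true_or, reduceIte, List.min?_cons, ih]
      by_cases ht : (t.any fun k => PySem.Str.isIn k name) = true
      · simp only [ht, reduceIte, Option.elim_some, Nat.min_self]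
      · simp only [Bool.not_eq_true] at ht
        simp only [ht, Bool.false_eq_true, if_false, Option.elim_none]
    · rw [show pvF name (k, i) = none from by unfold pvF; exact if_neg h]
      simp only [Bool.not_eq_true] at h
      simp only [h, Bool.false_or, ih]

-- the flattened tables as appends of constant-priority groups
theorem pvLayerKW_eq : pvLayerKW =
    (["I-", "INST", "INSTR"].map (fun k => (k, 0))) ++
    (["P-PIPE", "PIPING", "P-LINE"].map (fun k => (k, 1))) ++
    (["P-EQUIP", "EQUIP", "P-VESSEL", "P-MECH"].map (fun k => (k, 2))) ++
    (["P-VALVE", "VALVE"].map (fun k => (k, 3))) ++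
    (["E-", "ELEC"].map (fun k => (k, 4))) := rfl

theorem pvCtrlKW_eq : pvCtrlKW =
    (["FCV", "TCV", "PCV", "LCV", "CTRL"].map (fun k => (k, 0))) := rfl

theorem pvEquipKW_eq : pvEquipKW =
    (["PUMP", "PMP"].map (fun k => (k, 0))) ++
    (["TANK", "TK", "VESSEL", "DRUM"].map (fun k => (k, 1))) ++
    (["HX", "HEAT", "EXCH", "COOL"].map (fun k => (k, 2))) ++
    (["COMP", "BLOWER", "FAN"].map (fun k => (k, 3))) ++
    (["REACT", "COLUMN", "TOWER"].map (fun k => (k, 4))) := rfl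

-- min-priority search over the flattened layer table = the cascade's rule index
theorem pvBest_layer (ln : String) :
    pvBest ln pvLayerKW 5 =
      (if ["I-", "INST", "INSTR"].any (fun p => PySem.Str.isIn p ln) then 0
       else if ["P-PIPE", "PIPING", "P-LINE"].any (fun p => PySem.Str.isIn p ln) then 1
       else if ["P-EQUIP", "EQUIP", "P-VESSEL", "P-MECH"].any (fun p => PySem.Str.isIn p ln) then 2
       else if ["P-VALVE", "VALVE"].any (fun p => PySem.Str.isIn p ln) then 3
       else if ["E-", "ELEC"].any (fun p => PySem.Str.isIn p ln) then 4
       else 5) := by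
  rw [pvBest_eq_min?, pvLayerKW_eq]
  simp only [List.filterMap_append, pvMin?_append, pvGroupMin]
  split_ifs <;> rfl

theorem pvBest_ctrl (bn : String) :
    pvBest bn pvCtrlKW 1 =
      (if ["FCV", "TCV", "PCV", "LCV", "CTRL"].any (fun v => PySem.Str.isIn v bn) then 0 else 1) := by
  rw [pvBest_eq_min?, pvCtrlKW_eq, pvGroupMin]
  split_ifs <;> rfl

theorem pvBest_equip (bn : String) :
    pvBest bn pvEquipKW 5 =
      (if ["PUMP", "PMP"].any (fun v => PySem.Str.isIn v bn) then 0
       else if ["TANK", "TK", "VESSEL", "DRUM"].any (fun v => PySem.Str.isIn v bn) then 1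
       else if ["HX", "HEAT", "EXCH", "COOL"].any (fun v => PySem.Str.isIn v bn) then 2
       else if ["COMP", "BLOWER", "FAN"].any (fun v => PySem.Str.isIn v bn) then 3
       else if ["REACT", "COLUMN", "TOWER"].any (fun v => PySem.Str.isIn v bn) then 4
       else 5) := by
  rw [pvBest_eq_min?, pvEquipKW_eq]
  simp only [List.filterMap_append, pvMin?_append, pvGroupMin]
  split_ifs <;> rfl

-- ===== VERDICT =====
set_option maxHeartbeats 1600000 in
theorem classify_by_layer_spec : Claim_equal_classify_by_layer := by
  intro layer_name block_name _
  unfold Spec_classify_by_layer classify_by_layer classify_by_layer_alt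
  dsimp only
  rw [pvBest_layer, pvBest_ctrl, pvBest_equip]
  split_ifs <;> first | rfl | simp_all
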